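-- pv_equiv track=rewrite | github.com/gronendael/football_card_game | tools/migrate_play_routes.py | filtered_progression
-- ===== SOURCE A (Python) =====
-- DEFAULT_PROGRESSION = ["WR1", "WR2", "TE1", "RB1", "RB2", "TE2", "WR3"]
--
-- def filtered_progression(roles):
--     out = []
--     for want in DEFAULT_PROGRESSION:
--         if want in roles:
--             out.append(want)
--     for r in roles:
--         ru = r.upper()
--         if (ru.startswith("WR") or ru.startswith("TE") or ru.startswith("RB")) and r not in out:
--             out.append(r)
--     return out
-- ===== SOURCE B (Python) =====
-- DEFAULT_PROGRESSION = ["WR1", "WR2", "TE1", "RB1", "RB2", "TE2", "WR3"]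
--
-- def filtered_progression(roles):
--     # Build a priority rank per distinct kept role, then sort once by it:
--     # exact progression members rank by their progression index, other
--     # WR/TE/RB-prefixed roles rank after them by first occurrence in roles.
--     rank = {}
--     for i, r in enumerate(roles):
--         if r in rank:
--             continue
--         if r in DEFAULT_PROGRESSION:
--             rank[r] = DEFAULT_PROGRESSION.index(r)
--         elif r.upper().startswith(("WR", "TE", "RB")):
--             rank[r] = len(DEFAULT_PROGRESSION) + i
--     return sorted(rank, key=rank.get)
-- ===== Notes on version B (the rewrite author's own statement) =====
-- stated objective: idiomatic
-- what changed: Replaced A's two sequential scans (progression-order scan, then a roles-order scan with a linear 'not in out' dedup check) by one pass that builds a priority-rank dictionary (progression index for exact members, len(progression)+first index for other WR/TE/RB-prefixed roles, deduping via the dict) followed by a single sort on that rank.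
import Mathlib
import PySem

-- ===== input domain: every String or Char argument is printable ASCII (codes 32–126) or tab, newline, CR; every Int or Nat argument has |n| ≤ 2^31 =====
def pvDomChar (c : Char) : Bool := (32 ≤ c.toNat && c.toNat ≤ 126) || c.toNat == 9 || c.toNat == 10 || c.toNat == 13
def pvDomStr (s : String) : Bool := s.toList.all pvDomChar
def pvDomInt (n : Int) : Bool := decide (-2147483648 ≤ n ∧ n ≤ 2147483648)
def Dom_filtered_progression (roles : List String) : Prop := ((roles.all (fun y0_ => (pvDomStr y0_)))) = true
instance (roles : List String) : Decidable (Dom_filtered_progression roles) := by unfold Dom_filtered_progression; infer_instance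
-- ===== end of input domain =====

-- B replaces A's two directional scans by one pass building a priority-rank table plus a single sort (objective: alternative/idiomatic).

-- ===== PORT A =====
def pvProg : List String := ["WR1", "WR2", "TE1", "RB1", "RB2", "TE2", "WR3"]

-- prefix test shared by both Pythons: r.upper().startswith(("WR","TE","RB"))
def pvPref (r : String) : Bool :=
  PySem.Str.startswith (PySem.Str.upper r) "WR" ||
  PySem.Str.startswith (PySem.Str.upper r) "TE" ||
  PySem.Str.startswith (PySem.Str.upper r) "RB"

def filtered_progression (roles : List String) : List String :=
  let out := pvProg.foldl (fun out want => if want ∈ roles then out ++ [want] else out) []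
  roles.foldl (fun out r => if pvPref r = true ∧ r ∉ out then out ++ [r] else out) out

-- ===== PORT B =====
def filtered_progression_alt (roles : List String) : List String :=
  let rank : PySem.Dict String Int :=
    (PySem.List.enumerate roles 0).foldl (fun d p =>
      if d.contains p.2 then d
      else if p.2 ∈ pvProg then
        d.insert p.2 (((PySem.List.index? pvProg p.2).getD 0 : Nat) : Int)  -- DEFAULT_PROGRESSION.index(r), guarded by the membership test
      else if pvPref p.2 then d.insert p.2 ((pvProg.length : Int) + p.1)
      else d) PySem.Dict.empty
  PySem.List.sorted rank.keys (fun k => rank.getD k 0) false  -- sorted(rank, key=rank.get); every key is present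

-- ===== PRECONDITION & SPEC =====
def Spec_filtered_progression (roles : List String) (out : List String) : Prop := out = filtered_progression_alt roles
instance (roles : List String) (out : List String) : Decidable (Spec_filtered_progression roles out) := by unfold Spec_filtered_progression; infer_instance

-- ===== CLAIM (what is proved, stated in full; the proofs are below) =====
def Claim_equal_filtered_progression : Prop := ∀ (roles : List String), Dom_filtered_progression roles → Spec_filtered_progression roles (filtered_progression roles)

-- ===== LEMMAS AND PROOFS =====

-- the rank a key ends up with in B's table
def pvRk (roles : List String) (r : String) : Int :=
  if r ∈ pvProg then ((pvProg.idxOf r : Nat) : Int) else 7 + (roles.idxOf r : Int)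

theorem pvPref_of_mem_prog {r : String} (h : r ∈ pvProg) : pvPref r = true := by
  simp [pvProg] at h
  rcases h with rfl|rfl|rfl|rfl|rfl|rfl|rfl <;> decide

theorem pvRk_of_mem_prog (roles : List String) {r : String} (h : r ∈ pvProg) :
    pvRk roles r = ((pvProg.idxOf r : Nat) : Int) := by simp [pvRk, h]

theorem pvRk_of_not_mem_prog (roles : List String) {r : String} (h : r ∉ pvProg) :
    pvRk roles r = 7 + (roles.idxOf r : Int) := by simp [pvRk, h]

theorem pv_idxOf_append_cons {α : Type} [DecidableEq α] {pre : List α} (t : List α) (r : α)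
    (h : r ∉ pre) : (pre ++ r :: t).idxOf r = pre.length := by
  induction pre with
  | nil => simp
  | cons a l ih =>
      simp only [List.mem_cons, not_or] at h
      have hne : (a == r) = false := beq_eq_false_iff_ne.mpr (Ne.symm h.1)
      simp [List.idxOf_cons, hne, ih h.2]

theorem pv_idxOf_append_of_mem {α : Type} [DecidableEq α] {pre : List α} (t : List α) {r : α}
    (h : r ∈ pre) : (pre ++ t).idxOf r = pre.idxOf r := by
  induction pre with
  | nil => simp at h
  | cons a l ih =>
      by_cases ha : a = r
      · simp [ha]
      · have hne : (a == r) = false := by simpa using ha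
        simp only [List.mem_cons] at h
        rcases h with h | h
        · exact absurd h.symm ha
        · simp [List.idxOf_cons, hne, ih h]

-- characterisation of B's rank dictionary
theorem pv_dict_spec (roles : List String) :
    ∀ (suf pre : List String) (d : PySem.Dict String Int), roles = pre ++ suf →
    d.keys.Nodup →
    (∀ k, d.get? k = if k ∈ pre ∧ pvPref k then some (pvRk roles k) else none) →
    (∀ k, ((PySem.List.enumerate suf ((pre.length : Nat) : Int)).foldl (fun d p =>
      if d.contains p.2 then d
      else if p.2 ∈ pvProg then
        d.insert p.2 (((PySem.List.index? pvProg p.2).getD 0 : Nat) : Int)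
      else if pvPref p.2 then d.insert p.2 ((pvProg.length : Int) + p.1)
      else d) d).get? k = if k ∈ roles ∧ pvPref k then some (pvRk roles k) else none) ∧
    ((PySem.List.enumerate suf ((pre.length : Nat) : Int)).foldl (fun d p =>
      if d.contains p.2 then d
      else if p.2 ∈ pvProg then
        d.insert p.2 (((PySem.List.index? pvProg p.2).getD 0 : Nat) : Int)
      else if pvPref p.2 then d.insert p.2 ((pvProg.length : Int) + p.1)
      else d) d).keys.Nodup := by
  intro suf
  induction suf with
  | nil =>
      intro pre d hroles hnd hd
      rw [PySem.List.enumerate_nil]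
      simp only [List.foldl_nil]
      refine ⟨fun k => ?_, hnd⟩
      rw [hd k, hroles]
      simp
  | cons r t ih =>
      intro pre d hroles hnd hd
      rw [PySem.List.enumerate_cons, List.foldl_cons]
      have hcast : ((pre.length : Nat) : Int) + 1 = (((pre ++ [r]).length : Nat) : Int) := by
        simp [List.length_append]
      have hroles' : roles = (pre ++ [r]) ++ t := by simp [hroles]
      rw [hcast]
      simp only []
      split_ifs with h1 h2 h3
      · -- already in the dict: r ∈ pre and pvPref r
        have hr : r ∈ pre ∧ pvPref r = true := by
          rw [PySem.Dict.contains_eq_isSome_get?, hd r] at h1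
          by_contra hnr
          rw [if_neg hnr] at h1
          simp at h1
        refine ih (pre ++ [r]) d hroles' hnd (fun k => ?_)
        rw [hd k]
        by_cases hk : k = r
        · subst hk
          simp [hr.1, hr.2]
        · simp only [List.mem_append, List.mem_singleton]
          have : (k ∈ pre ∨ k = r) ↔ k ∈ pre := ⟨fun h => h.resolve_right hk, Or.inl⟩
          simp only [this]
      · -- fresh key, exact progression member
        have hnr : ¬(r ∈ pre ∧ pvPref r = true) := by
          intro hr
          rw [PySem.Dict.contains_eq_isSome_get?, hd r, if_pos hr] at h1
          simp at h1
        have hv : (((PySem.List.index? pvProg r).getD 0 : Nat) : Int) = pvRk roles r := by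
          rw [pvRk_of_mem_prog roles h2]
          have h2' := h2
          simp only [pvProg, List.mem_cons, List.not_mem_nil, or_false] at h2'
          rcases h2' with rfl|rfl|rfl|rfl|rfl|rfl|rfl <;> decide
        refine ih (pre ++ [r]) _ hroles' (PySem.Dict.nodup_keys_insert _ _ _ hnd) (fun k => ?_)
        rw [PySem.Dict.get?_insert]
        by_cases hk : k = r
        · subst hk
          rw [if_pos rfl, if_pos ⟨by simp, pvPref_of_mem_prog h2⟩, hv]
        · rw [if_neg hk, hd k]
          simp only [List.mem_append, List.mem_singleton]
          have : (k ∈ pre ∨ k = r) ↔ k ∈ pre := ⟨fun h => h.resolve_right hk, Or.inl⟩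
          simp only [this]
      · -- fresh key, prefixed extra: first occurrence is at index pre.length
        have hnr : ¬(r ∈ pre ∧ pvPref r = true) := by
          intro hr
          rw [PySem.Dict.contains_eq_isSome_get?, hd r, if_pos hr] at h1
          simp at h1
        have hrpre : r ∉ pre := fun hm => hnr ⟨hm, h3⟩
        have hv : (pvProg.length : Int) + ((pre.length : Nat) : Int) = pvRk roles r := by
          rw [pvRk_of_not_mem_prog roles h2, hroles, pv_idxOf_append_cons t r hrpre]
          norm_num [pvProg]
        refine ih (pre ++ [r]) _ hroles' (PySem.Dict.nodup_keys_insert _ _ _ hnd) (fun k => ?_)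
        rw [PySem.Dict.get?_insert]
        by_cases hk : k = r
        · subst hk
          rw [if_pos rfl, if_pos ⟨by simp, h3⟩, hv]
        · rw [if_neg hk, hd k]
          simp only [List.mem_append, List.mem_singleton]
          have : (k ∈ pre ∨ k = r) ↔ k ∈ pre := ⟨fun h => h.resolve_right hk, Or.inl⟩
          simp only [this]
      · -- fresh key, not kept
        refine ih (pre ++ [r]) d hroles' hnd (fun k => ?_)
        rw [hd k]
        by_cases hk : k = r
        · subst hk
          rw [if_neg (fun h => h2 (absurd h.2 (by simp [h3]))), if_neg (by simp [h3])]
        · simp only [List.mem_append, List.mem_singleton]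
          have : (k ∈ pre ∨ k = r) ↔ k ∈ pre := ⟨fun h => h.resolve_right hk, Or.inl⟩
          simp only [this]

-- A's second loop: membership
theorem pvA_mem (l : List String) : ∀ (out : List String) (x : String),
    x ∈ l.foldl (fun out r => if pvPref r = true ∧ r ∉ out then out ++ [r] else out) out ↔
      x ∈ out ∨ (x ∈ l ∧ pvPref x) := by
  induction l with
  | nil => simp
  | cons r t ih =>
      intro out x
      simp only [List.foldl_cons]
      split_ifs with h
      · rw [ih]
        simp only [List.mem_append, List.mem_cons, List.not_mem_nil, or_false]
        constructor
        · rintro ((hx | rfl) | ⟨hx, hq⟩)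
          · exact Or.inl hx
          · exact Or.inr ⟨Or.inl rfl, h.1⟩
          · exact Or.inr ⟨Or.inr hx, hq⟩
        · rintro (hx | ⟨rfl | hx, hq⟩)
          · exact Or.inl (Or.inl hx)
          · exact Or.inl (Or.inr rfl)
          · exact Or.inr ⟨hx, hq⟩
      · rw [ih]
        simp only [List.mem_cons]
        constructor
        · rintro (hx | ⟨hx, hq⟩)
          · exact Or.inl hx
          · exact Or.inr ⟨Or.inr hx, hq⟩
        · rintro (hx | ⟨rfl | hx, hq⟩)
          · exact Or.inl hx
          · by_cases hm : x ∈ out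
            · exact Or.inl hm
            · exact absurd ⟨hq, hm⟩ h
          · exact Or.inr ⟨hx, hq⟩

-- A's second loop: nodup
theorem pvA_nodup (l : List String) : ∀ (out : List String), out.Nodup →
    (l.foldl (fun out r => if pvPref r = true ∧ r ∉ out then out ++ [r] else out) out).Nodup := by
  induction l with
  | nil => exact fun _ h => h
  | cons r t ih =>
      intro out h
      simp only [List.foldl_cons]
      split_ifs with hc
      · refine ih _ ?_
        rw [List.nodup_append]
        refine ⟨h, List.nodup_singleton _, ?_⟩
        rintro a ha b hb rfl
        simp only [List.mem_singleton] at hb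
        exact hc.2 (hb ▸ ha)
      · exact ih _ h

-- A's second loop: pairwise strict rank increase
theorem pvA_pairwise (roles : List String) : ∀ (suf pre out : List String),
    roles = pre ++ suf →
    out.Pairwise (fun a b => pvRk roles a < pvRk roles b) →
    (∀ y ∈ out, y ∈ pvProg ∨ y ∈ pre) →
    (∀ y ∈ pre, pvPref y = true → y ∈ out) →
    (∀ y ∈ pvProg, y ∈ roles → y ∈ out) →
    (suf.foldl (fun out r => if pvPref r = true ∧ r ∉ out then out ++ [r] else out) out).Pairwise
      (fun a b => pvRk roles a < pvRk roles b) := by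
  intro suf
  induction suf with
  | nil => intro pre out _ h _ _ _; simpa using h
  | cons r t ih =>
      intro pre out hroles hpw h3 h4 h5
      simp only [List.foldl_cons]
      split_ifs with hc
      · -- r is appended
        have hrP : r ∉ pvProg := fun hm => hc.2 (h5 r hm (by rw [hroles]; simp))
        have hrpre : r ∉ pre := fun hm => hc.2 (h4 r hm hc.1)
        have hidx : roles.idxOf r = pre.length := by
          rw [hroles]; exact pv_idxOf_append_cons t r hrpre
        have hRr : ∀ x ∈ out, pvRk roles x < pvRk roles r := by
          intro x hx
          rw [pvRk_of_not_mem_prog roles hrP, hidx]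
          have hlen : pvProg.length = 7 := rfl
          rcases h3 x hx with hxP | hxpre
          · rw [pvRk_of_mem_prog roles hxP]
            have h7 : pvProg.idxOf x < pvProg.length := List.idxOf_lt_length_of_mem hxP
            omega
          · by_cases hxP : x ∈ pvProg
            · rw [pvRk_of_mem_prog roles hxP]
              have h7 : pvProg.idxOf x < pvProg.length := List.idxOf_lt_length_of_mem hxP
              omega
            · rw [pvRk_of_not_mem_prog roles hxP]
              have hxi : roles.idxOf x = pre.idxOf x := by
                rw [hroles]; exact pv_idxOf_append_of_mem _ hxpre
              have h2 : pre.idxOf x < pre.length := List.idxOf_lt_length_of_mem hxpre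
              omega
        refine ih (pre ++ [r]) (out ++ [r]) (by simp [hroles]) ?_ ?_ ?_ ?_
        · rw [List.pairwise_append]
          refine ⟨hpw, List.pairwise_singleton _ _, ?_⟩
          intro a ha b hb
          simp only [List.mem_singleton] at hb
          subst hb
          exact hRr a ha
        · intro y hy
          rcases List.mem_append.mp hy with hy | hy
          · rcases h3 y hy with h | h
            · exact Or.inl h
            · exact Or.inr (by simp [h])
          · simp only [List.mem_singleton] at hy
            subst hy
            exact Or.inr (by simp)
        · intro y hy hp
          rcases List.mem_append.mp hy with hy | hy
          · exact List.mem_append.mpr (Or.inl (h4 y hy hp))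
          · simp only [List.mem_singleton] at hy
            subst hy
            exact List.mem_append.mpr (Or.inr (by simp))
        · intro y hy hyr
          exact List.mem_append.mpr (Or.inl (h5 y hy hyr))
      · refine ih (pre ++ [r]) out (by simp [hroles]) hpw ?_ ?_ h5
        · intro y hy
          rcases h3 y hy with h | h
          · exact Or.inl h
          · exact Or.inr (by simp [h])
        · intro y hy hp
          rcases List.mem_append.mp hy with hy | hy
          · exact h4 y hy hp
          · simp only [List.mem_singleton] at hy
            subst hy
            by_cases hm : y ∈ out
            · exact hm
            · exact absurd ⟨hp, hm⟩ hc

-- foldl of A's first loop is a filter of the progression list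
theorem pv_foldl_filter (roles : List String) : ∀ (l out : List String),
    l.foldl (fun out want => if want ∈ roles then out ++ [want] else out) out
      = out ++ l.filter (fun w => decide (w ∈ roles)) := by
  intro l
  induction l with
  | nil => simp
  | cons w t ih =>
      intro out
      simp only [List.foldl_cons, List.filter_cons]
      by_cases hw : w ∈ roles
      · simp [hw, ih]
      · simp [hw, ih]

-- ===== VERDICT (by name: the statement is the Claim_ definition above) =====
theorem filtered_progression_spec : Claim_equal_filtered_progression := by
  unfold Claim_equal_filtered_progression
  intro roles _
  unfold Spec_filtered_progression filtered_progression filtered_progression_alt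
  simp only [pv_foldl_filter]
  simp only [List.nil_append]
  set memPart := pvProg.filter (fun w => decide (w ∈ roles)) with hmp
  set Aout := roles.foldl (fun out r => if pvPref r = true ∧ r ∉ out then out ++ [r] else out) memPart with hAout
  set d := (PySem.List.enumerate roles 0).foldl (fun d p =>
      if d.contains p.2 then d
      else if p.2 ∈ pvProg then
        d.insert p.2 (((PySem.List.index? pvProg p.2).getD 0 : Nat) : Int)
      else if pvPref p.2 then d.insert p.2 ((pvProg.length : Int) + p.1)
      else d) PySem.Dict.empty with hdd
  -- dictionary characterisation
  have hspec := pv_dict_spec roles roles [] PySem.Dict.empty (by simp)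
    (by simp [PySem.Dict.keys_empty]) (fun k => by simp [PySem.Dict.get?_empty])
  simp only [List.length_nil, Nat.cast_zero] at hspec
  rw [← hdd] at hspec
  obtain ⟨hd, hndk⟩ := hspec
  -- membership facts
  have hmemP : ∀ x, x ∈ memPart ↔ x ∈ pvProg ∧ x ∈ roles := by
    intro x; simp [hmp, List.mem_filter]
  have hA_mem : ∀ x, x ∈ Aout ↔ x ∈ roles ∧ pvPref x = true := by
    intro x
    rw [hAout, pvA_mem]
    constructor
    · rintro (hx | hx)
      · rcases (hmemP x).mp hx with ⟨hP, hr⟩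
        exact ⟨hr, pvPref_of_mem_prog hP⟩
      · exact hx
    · exact Or.inr
  have hkmem : ∀ k, k ∈ d.keys ↔ k ∈ roles ∧ pvPref k = true := by
    intro k
    constructor
    · intro hk
      by_contra hnk
      have := hd k
      rw [if_neg hnk] at this
      exact ((PySem.Dict.get?_eq_none_iff_not_mem_keys _ _).mp this) hk
    · intro hk
      by_contra hnk
      have := hd k
      rw [if_pos hk, (PySem.Dict.get?_eq_none_iff_not_mem_keys _ _).mpr hnk] at this
      simp at this
  -- nodup on both sides
  have hndP : memPart.Nodup := List.Nodup.filter _ (by decide)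
  have hA_nodup : Aout.Nodup := pvA_nodup roles memPart hndP
  -- pairwise rank on A's output
  have hpp : pvProg.Pairwise (fun a b => pvRk roles a < pvRk roles b) := by
    have hlit : pvProg.Pairwise (fun a b => pvProg.idxOf a < pvProg.idxOf b) := by decide
    refine hlit.imp_of_mem ?_
    intro a b ha hb h
    rw [pvRk_of_mem_prog roles ha, pvRk_of_mem_prog roles hb]
    exact_mod_cast h
  have hA_pw : Aout.Pairwise (fun a b => pvRk roles a < pvRk roles b) := by
    rw [hAout]
    refine pvA_pairwise roles roles [] memPart (by simp) (hpp.filter _) ?_ (by simp) ?_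
    · intro y hy
      exact Or.inl ((hmemP y).mp hy).1
    · intro y hyP hyr
      exact (hmemP y).mpr ⟨hyP, hyr⟩
  -- transfer the rank to the dict's key function
  have hkey : ∀ a ∈ Aout, d.getD a 0 = pvRk roles a := by
    intro a ha
    have hc := (hA_mem a).mp ha
    rw [PySem.Dict.getD_eq_get?_getD, hd a, if_pos hc]
    rfl
  have hperm : Aout.Perm d.keys :=
    (List.perm_ext_iff_of_nodup hA_nodup hndk).mpr (fun a => by rw [hA_mem, hkmem])
  have hpw' : Aout.Pairwise (fun a b => d.getD a 0 < d.getD b 0) := by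
    refine hA_pw.imp_of_mem ?_
    intro a b ha hb h
    rw [hkey a ha, hkey b hb]
    exact h
  exact (PySem.List.sorted_eq_of_perm_of_pairwise_lt _ _ (fun k => d.getD k 0) hperm hpw').symm
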